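-- pv_equiv track=rewrite | github.com/AKleriX/codewars-tasks | What Color is Your Name/task-solution.py | string_color
-- ===== SOURCE A (Python) =====
-- def string_color(name):
--     if len(name) < 2:
--         return
--     t, p = 0, 1
--     for c in name:
--         v = ord(c)
--         t += v
--         p = p * v % 256
--     return f'{t%256:02X}{p:02X}{abs(ord(name[0])*2-t)%256:02X}'
-- ===== SOURCE B (Python) =====
-- def string_color(name):
--     if len(name) < 2:
--         return None
--     counts = {}
--     for c in name:
--         counts[c] = counts.get(c, 0) + 1
--     t = sum(ord(c) * k for c, k in counts.items())
--     p = 1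
--     for c, k in counts.items():
--         p = p * pow(ord(c), k, 256) % 256
--     return '%02X%02X%02X' % (t % 256, p, abs(ord(name[0]) * 2 - t) % 256)
-- ===== Notes on version B (the rewrite author's own statement) =====
-- stated objective: alternative
-- what changed: B replaces A's single fused accumulate-and-mod loop by a character histogram: it counts occurrences once, then gets the sum as sum(ord(c)*k) and the product mod 256 as a product of pow(ord(c), k, 256) over the distinct characters, formatting with %-interpolation.
import Mathlib
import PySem

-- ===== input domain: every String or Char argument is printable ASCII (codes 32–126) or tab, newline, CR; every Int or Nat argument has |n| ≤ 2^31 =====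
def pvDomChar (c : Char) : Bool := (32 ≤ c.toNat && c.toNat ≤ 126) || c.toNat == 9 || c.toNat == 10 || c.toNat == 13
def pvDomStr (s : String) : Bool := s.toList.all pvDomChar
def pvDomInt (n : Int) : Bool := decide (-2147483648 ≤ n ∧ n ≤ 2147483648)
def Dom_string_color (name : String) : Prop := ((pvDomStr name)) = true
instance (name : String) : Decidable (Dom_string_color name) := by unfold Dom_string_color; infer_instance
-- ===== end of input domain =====

-- B replaces A's fused accumulate-and-mod loop by a character histogram plus modular
-- exponentiation per distinct character (objective: alternative; return value only).

-- '{v:02X}' for 0 ≤ v < 256: two uppercase hex digits (shared formatting helper of both ports)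
def pvHexDig (n : Nat) : Char := if n < 10 then Char.ofNat (48 + n) else Char.ofNat (55 + n)
def pvHex2 (v : Int) : List Char := [pvHexDig (v.toNat / 16), pvHexDig (v.toNat % 16)]

-- ===== PORT A =====
def string_color (name : String) : Option String :=
  let cs := name.toList
  if cs.length < 2 then none
  else
    let tp : Int × Int :=
      cs.foldl (fun tp c => (tp.1 + (c.toNat : Int), PySem.Int.mod (tp.2 * (c.toNat : Int)) 256)) (0, 1)
    -- name[0] is safe under the guard: headD is its total form here
    some (String.ofList (pvHex2 (PySem.Int.mod tp.1 256) ++ pvHex2 tp.2 ++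
      pvHex2 (PySem.Int.mod |((cs.headD ' ').toNat : Int) * 2 - tp.1| 256)))

-- ===== PORT B =====
def string_color_alt (name : String) : Option String :=
  if name.toList.length < 2 then none
  else
    let counts : PySem.Dict Char Int :=
      name.toList.foldl (fun d c => d.insert c (d.getD c 0 + 1)) PySem.Dict.empty
    let t : Int := (counts.items.map (fun q => ((q.1.toNat : Int)) * q.2)).sum
    -- pow(ord(c), k, 256): counts are nonnegative, so the Nat exponent k.toNat is exact
    let p : Int := counts.items.foldl
      (fun acc q => PySem.Int.mod (acc * PySem.Int.powMod (q.1.toNat : Int) q.2.toNat 256) 256) 1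
    some (String.ofList (pvHex2 (PySem.Int.mod t 256) ++ pvHex2 p ++
      pvHex2 (PySem.Int.mod |((name.toList.headD ' ').toNat : Int) * 2 - t| 256)))

-- ===== PRECONDITION & SPEC =====
def Spec_string_color (name : String) (out : Option String) : Prop := out = string_color_alt name
instance (name : String) (out : Option String) : Decidable (Spec_string_color name out) := by unfold Spec_string_color; infer_instance

-- ===== CLAIM (what is proved, stated in full; the proofs are below) =====
def Claim_equal_string_color : Prop := ∀ (name : String), Dom_string_color name → Spec_string_color name (string_color name)

-- ===== LEMMAS AND PROOFS =====

-- canonical value both ports are reduced to: T = Σ ord, P = (Π ord) % 256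
def pvCanon (name : String) : Option String :=
  let cs := name.toList
  if cs.length < 2 then none
  else
    let T : Int := (cs.map (fun c => (c.toNat : Int))).sum
    let P : Int := (cs.map (fun c => (c.toNat : Int))).prod % 256
    some (String.ofList (pvHex2 (PySem.Int.mod T 256) ++ pvHex2 P ++
      pvHex2 (PySem.Int.mod |((cs.headD ' ').toNat : Int) * 2 - T| 256)))

lemma pvLoopA (cs : List Char) (a b : Int) (hb : b % 256 = b) :
    cs.foldl (fun tp c => (tp.1 + (c.toNat : Int), PySem.Int.mod (tp.2 * (c.toNat : Int)) 256)) (a, b)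
      = (a + (cs.map (fun c => (c.toNat : Int))).sum,
         (b * (cs.map (fun c => (c.toNat : Int))).prod) % 256) := by
  induction cs generalizing a b with
  | nil => simp [hb]
  | cons c cs ih =>
    simp only [List.foldl_cons, List.map_cons, List.sum_cons, List.prod_cons]
    rw [PySem.Int.mod_eq_emod_of_pos (by norm_num)]
    rw [ih (a + c.toNat) (b * c.toNat % 256) (Int.emod_emod_of_dvd _ (dvd_refl _))]
    simp only [Prod.mk.injEq]
    refine ⟨by ring, ?_⟩
    rw [Int.mul_emod, Int.emod_emod_of_dvd _ (dvd_refl (256 : Int)), ← Int.mul_emod, mul_assoc]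

lemma pvLoopB {β : Type} (l : List β) (g : β → Int) (b : Int) (hb : b % 256 = b) :
    l.foldl (fun acc q => PySem.Int.mod (acc * g q) 256) b = (b * (l.map g).prod) % 256 := by
  induction l generalizing b with
  | nil => simp [hb]
  | cons x l ih =>
    simp only [List.foldl_cons, List.map_cons, List.prod_cons]
    rw [PySem.Int.mod_eq_emod_of_pos (by norm_num)]
    rw [ih (b * g x % 256) (Int.emod_emod_of_dvd _ (dvd_refl _))]
    rw [Int.mul_emod, Int.emod_emod_of_dvd _ (dvd_refl (256 : Int)), ← Int.mul_emod, mul_assoc]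

lemma pvToFinset_ofList (cs : List Char) : (PySem.Set.ofList cs).toFinset = cs.toFinset := by
  ext c; simp [List.mem_toFinset, PySem.Set.mem_ofList]

lemma pvSumCounts (cs : List Char) :
    ((PySem.Set.ofList cs).map (fun c => (c.toNat : Int) * (cs.count c : Int))).sum
      = (cs.map (fun c => (c.toNat : Int))).sum := by
  rw [← List.sum_toFinset _ (PySem.Set.nodup_ofList cs), pvToFinset_ofList]
  have h := Finset.sum_multiset_map_count (cs : Multiset Char) (fun c => (c.toNat : Int))
  simp only [Multiset.coe_count, List.toFinset_coe, Multiset.map_coe, Multiset.sum_coe] at h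
  rw [h]
  exact Finset.sum_congr rfl (fun c _ => by rw [nsmul_eq_mul]; ring)

lemma pvProdCounts (cs : List Char) :
    ((PySem.Set.ofList cs).map (fun c => (c.toNat : Int) ^ cs.count c)).prod
      = (cs.map (fun c => (c.toNat : Int))).prod := by
  rw [← List.prod_toFinset _ (PySem.Set.nodup_ofList cs), pvToFinset_ofList]
  have h := Finset.prod_multiset_map_count (cs : Multiset Char) (fun c => (c.toNat : Int))
  simp only [Multiset.coe_count, List.toFinset_coe, Multiset.map_coe, Multiset.prod_coe] at h
  exact h.symm

lemma pvA_eq_canon (name : String) : string_color name = pvCanon name := by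
  simp only [string_color, pvCanon]
  by_cases h : name.toList.length < 2
  · rw [if_pos h, if_pos h]
  · rw [if_neg h, if_neg h, pvLoopA name.toList 0 1 (by norm_num)]
    simp

lemma pvModProd (l : List Char) (g : Char → Int) :
    (l.map (fun x => g x % 256)).prod % 256 = (l.map g).prod % 256 := by
  rw [show (fun x => g x % 256) = (fun y => y % 256) ∘ g from rfl, ← List.map_map,
      ← List.prod_int_mod]

lemma pvB_eq_canon (name : String) : string_color_alt name = pvCanon name := by
  simp only [string_color_alt, pvCanon]
  by_cases h : name.toList.length < 2
  · rw [if_pos h, if_pos h]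
  · rw [if_neg h, if_neg h, PySem.Dict.foldl_insert_getD_add_one_eq_counter,
        PySem.Dict.items_counter]
    rw [pvLoopB _ _ 1 (by norm_num), one_mul]
    rw [List.map_map, List.map_map]
    rw [show ((fun q : Char × Int => PySem.Int.powMod (↑q.1.toNat) q.2.toNat 256) ∘
          (fun k => (k, (List.count k name.toList : Int))))
        = fun c => ((c.toNat : Int) ^ List.count c name.toList) % 256 from
      funext fun c => by
        rw [Function.comp_apply, Int.toNat_natCast,
            PySem.Int.powMod_eq_emod _ _ (by norm_num)]]
    rw [pvModProd, pvProdCounts]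
    rw [show ((fun q : Char × Int => ((q.1.toNat : Int)) * q.2) ∘
          (fun k => (k, (List.count k name.toList : Int))))
        = fun c => (c.toNat : Int) * (List.count c name.toList : Int) from rfl]
    rw [pvSumCounts]

-- ===== VERDICT (by name: the statement is the Claim_ definition above) =====
theorem string_color_spec : Claim_equal_string_color := by
  intro name _
  unfold Spec_string_color
  rw [pvA_eq_canon, pvB_eq_canon]
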